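-- pv_equiv track=rewrite | github.com/aidanaden/movie-booking-api | scrape.py | handleWords
-- ===== SOURCE A (Python) =====
-- def handleWords(name, brands):
--     finalWord = []
--
--     # iterate thru each word in movie
--     # name to remove any word that is
--     # a brand name
--     for n in name.split():
--         containsBrand = False
--         for b in brands:
--             if b in n:
--                 containsBrand = True
--                 break
--         if not containsBrand:
--             finalWord.append(n)
--     return ' '.join(finalWord).strip()
-- ===== SOURCE B (Python) =====
-- def _hasBrandSub(w, brandset, lengths):
--     # does any substring of w (of a length some brand has) lie in the brand set?
--     n = len(w)
--     return any(i + L <= n and w[i:i + L] in brandset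
--                for i in range(n) for L in lengths)
--
-- def handleWords(name, brands):
--     brandset = set(brands)
--     if "" in brandset:
--         return ""
--     lengths = {len(b) for b in brandset}
--     kept = [w for w in name.split() if not _hasBrandSub(w, brandset, lengths)]
--     return " ".join(kept)
-- ===== Notes on version B (the rewrite author's own statement) =====
-- stated objective: alternative
-- what changed: Instead of scanning every brand per word with a substring search, B builds a hash set of the brands and of their lengths once, handles an empty brand up front, and tests each candidate substring of each word for set membership; the redundant trailing .strip() is dropped.
import Mathlib
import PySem

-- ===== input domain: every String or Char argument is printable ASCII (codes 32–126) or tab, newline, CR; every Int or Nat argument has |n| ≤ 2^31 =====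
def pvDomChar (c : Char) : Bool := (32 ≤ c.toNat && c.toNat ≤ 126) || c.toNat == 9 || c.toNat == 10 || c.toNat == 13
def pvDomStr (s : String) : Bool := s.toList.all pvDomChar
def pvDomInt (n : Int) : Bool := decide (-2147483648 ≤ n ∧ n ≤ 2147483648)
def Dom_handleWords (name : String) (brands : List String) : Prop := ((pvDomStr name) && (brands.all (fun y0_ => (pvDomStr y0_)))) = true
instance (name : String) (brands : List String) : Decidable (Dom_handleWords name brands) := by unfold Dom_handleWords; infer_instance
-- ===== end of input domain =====

-- B replaces A's per-word scan over all brands by hash-set membership tests on the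
-- word's substrings of the brands' lengths (an empty brand is handled once up front);
-- the redundant trailing .strip() is dropped.

-- ===== PORT A =====
-- inner 'for b in brands: if b in n: containsBrand = True; break'
def pvBrandLoop (n : String) : List String → Bool
  | [] => false
  | b :: bs => if PySem.Str.isIn b n then true else pvBrandLoop n bs

def handleWords (name : String) (brands : List String) : String :=
  let finalWord := (PySem.Str.split₀ name).foldl
    (fun acc n => if !(pvBrandLoop n brands) then acc ++ [n] else acc) []
  PySem.Str.strip (PySem.Str.join " " finalWord)

-- ===== PORT B =====
-- any(i + L <= n and w[i:i+L] in brandset for i in range(n) for L in lengths)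
def pvHasBrandSub (w : String) (brandset : PySem.Set String) (lengths : PySem.Set Nat) : Bool :=
  (List.range w.toList.length).any fun i =>
    lengths.any fun L =>
      decide (i + L ≤ w.toList.length) &&
        brandset.contains (String.ofList ((w.toList.drop i).take L))

def handleWords_alt (name : String) (brands : List String) : String :=
  let brandset := PySem.Set.ofList brands
  if brandset.contains "" then ""
  else
    let lengths := PySem.Set.ofList (brandset.map (fun b => b.toList.length))
    PySem.Str.join " "
      ((PySem.Str.split₀ name).filter (fun w => !pvHasBrandSub w brandset lengths))

-- ===== PRECONDITION & SPEC =====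
def Spec_handleWords (name : String) (brands : List String) (out : String) : Prop := out = handleWords_alt name brands
instance (name : String) (brands : List String) (out : String) : Decidable (Spec_handleWords name brands out) := by unfold Spec_handleWords; infer_instance

-- ===== CLAIM (what is proved, stated in full; the proofs are below) =====
def Claim_equal_handleWords : Prop := ∀ (name : String) (brands : List String), Dom_handleWords name brands → Spec_handleWords name brands (handleWords name brands)

-- ===== LEMMAS AND PROOFS =====

theorem pvBrandLoop_eq_true_iff (n : String) (bs : List String) :
    pvBrandLoop n bs = true ↔ ∃ b ∈ bs, PySem.Str.isIn b n = true := by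
  induction bs with
  | nil => simp [pvBrandLoop]
  | cons b bs ih =>
    simp only [pvBrandLoop]
    by_cases h : PySem.Str.isIn b n = true
    · rw [if_pos h]
      exact iff_of_true rfl ⟨b, List.mem_cons_self .., h⟩
    · rw [if_neg h, ih]
      constructor
      · rintro ⟨c, hc, hcn⟩; exact ⟨c, List.mem_cons_of_mem _ hc, hcn⟩
      · rintro ⟨c, hc, hcn⟩
        rcases List.mem_cons.mp hc with rfl | hc'
        · exact absurd hcn h
        · exact ⟨c, hc', hcn⟩

theorem pvIsIn_empty (w : String) : PySem.Str.isIn "" w = true := by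
  simp [PySem.Str.isIn, PySem.Chars.isIn_nil]

theorem pvHasBrandSub_eq_true_iff (w : String) (brands : List String) :
    pvHasBrandSub w (PySem.Set.ofList brands)
        (PySem.Set.ofList ((PySem.Set.ofList brands).map (fun b => b.toList.length))) = true ↔
      ∃ i L, i < w.toList.length ∧ (∃ b ∈ brands, b.toList.length = L) ∧
        i + L ≤ w.toList.length ∧
        String.ofList ((w.toList.drop i).take L) ∈ brands := by
  simp only [pvHasBrandSub, List.any_eq_true, List.mem_range, Bool.and_eq_true,
    decide_eq_true_eq, PySem.Set.contains_iff, PySem.Set.mem_ofList, List.mem_map]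
  constructor
  · rintro ⟨i, hi, L, ⟨b, hb, hbl⟩, hle, hmem⟩
    exact ⟨i, L, hi, ⟨b, hb, hbl⟩, hle, hmem⟩
  · rintro ⟨i, L, hi, ⟨b, hb, hbl⟩, hle, hmem⟩
    exact ⟨i, hi, L, ⟨b, hb, hbl⟩, hle, hmem⟩

-- per-word agreement when no brand is the empty string
theorem pvWord_agree (brands : List String) (hne : "" ∉ brands) (w : String) :
    pvBrandLoop w brands = pvHasBrandSub w (PySem.Set.ofList brands)
        (PySem.Set.ofList ((PySem.Set.ofList brands).map (fun b => b.toList.length))) := by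
  cases hb : pvHasBrandSub w (PySem.Set.ofList brands)
      (PySem.Set.ofList ((PySem.Set.ofList brands).map (fun b => b.toList.length))) with
  | false => -- no substring is a brand ⇒ the brand loop finds nothing
    rw [← Bool.not_eq_true] at hb ⊢
    rw [pvHasBrandSub_eq_true_iff] at hb
    rw [pvBrandLoop_eq_true_iff]
    rintro ⟨b, hbmem, hbin⟩
    rw [PySem.Str.isIn_iff_infix] at hbin
    obtain ⟨s, t, hst⟩ := hbin
    have hbne : b.toList ≠ [] := by
      intro h0
      have : b = "" := by rw [← String.ofList_toList (s := b), h0]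
      exact hne (this ▸ hbmem)
    have h1 : s.length + b.toList.length + t.length = w.toList.length := by
      have h2 := congrArg List.length hst
      simpa [Nat.add_assoc] using h2
    have h3 : 0 < b.toList.length := List.length_pos_iff.mpr hbne
    have h4 : b.toList.length = b.length := by simp
    refine hb ⟨s.length, b.toList.length, by omega, ⟨b, hbmem, rfl⟩, by omega, ?_⟩
    have hdrop : w.toList.drop s.length = b.toList ++ t := by
      rw [← hst, List.append_assoc, List.drop_left]
    have htake : (b.toList ++ t).take b.toList.length = b.toList := List.take_left
    rw [hdrop, htake, String.ofList_toList]
    exact hbmem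
  | true =>
    -- some substring is a brand ⇒ the brand loop finds it
    rw [pvHasBrandSub_eq_true_iff] at hb
    obtain ⟨i, L, _, _, _, hmem⟩ := hb
    rw [pvBrandLoop_eq_true_iff]
    refine ⟨_, hmem, ?_⟩
    rw [PySem.Str.isIn_iff_infix]
    have h1 : (String.ofList ((w.toList.drop i).take L)).toList
        = (w.toList.drop i).take L := by simp
    rw [h1]
    exact ((List.take_prefix _ _).isInfix).trans (List.drop_suffix i w.toList).isInfix

-- every word produced by str.split() is nonempty and whitespace-free
theorem pvSplit₀go_words (rest : List Char) :
    ∀ (cur : List Char) (acc : List (List Char)),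
      (∀ c ∈ cur, PySem.Chars.isspace c = false) →
      (∀ u ∈ acc, u ≠ [] ∧ ∀ c ∈ u, PySem.Chars.isspace c = false) →
      ∀ u ∈ PySem.Chars.split₀.go rest cur acc,
        u ≠ [] ∧ ∀ c ∈ u, PySem.Chars.isspace c = false := by
  induction rest with
  | nil =>
    intro cur acc hcur hacc u hu
    rw [PySem.Chars.split₀.go.eq_def] at hu
    by_cases hc : cur.isEmpty = true
    · simp only [hc, if_pos, List.mem_reverse] at hu
      exact hacc u hu
    · simp only [hc, if_neg, Bool.false_eq_true, not_false_iff, List.mem_reverse,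
        List.mem_cons] at hu
      rcases hu with hu | hu
      · subst hu
        refine ⟨by simpa [List.isEmpty_iff] using hc, ?_⟩
        intro c hcm; exact hcur c (List.mem_reverse.mp hcm)
      · exact hacc u hu
  | cons c rest ih =>
    intro cur acc hcur hacc u hu
    rw [PySem.Chars.split₀.go.eq_def] at hu
    by_cases hs : PySem.Chars.isspace c = true
    · by_cases hc : cur.isEmpty = true
      · simp only [hs, hc, if_pos] at hu
        exact ih [] acc (by simp) hacc u hu
      · simp only [hs, hc, if_pos, if_neg, Bool.false_eq_true, not_false_iff] at hu
        refine ih [] _ (by simp) ?_ u hu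
        intro v hv
        rcases List.mem_cons.mp hv with hv | hv
        · subst hv
          refine ⟨by simpa [List.isEmpty_iff] using hc, ?_⟩
          intro a ha; exact hcur a (List.mem_reverse.mp ha)
        · exact hacc v hv
    · simp only [hs, if_neg, Bool.false_eq_true, not_false_iff] at hu
      refine ih (c :: cur) acc ?_ hacc u hu
      intro a ha
      rcases List.mem_cons.mp ha with ha | ha
      · subst ha; exact Bool.not_eq_true _ ▸ hs
      · exact hcur a ha

theorem pvSplit₀_words (cs : List Char) :
    ∀ u ∈ PySem.Chars.split₀ cs, u ≠ [] ∧ ∀ c ∈ u, PySem.Chars.isspace c = false :=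
  pvSplit₀go_words cs [] [] (by simp) (by simp)

theorem pvLstrip_join (ws : List (List Char))
    (h : ∀ u ∈ ws, u ≠ [] ∧ ∀ c ∈ u, PySem.Chars.isspace c = false) :
    PySem.Chars.lstrip (PySem.Chars.join [' '] ws) = PySem.Chars.join [' '] ws := by
  cases ws with
  | nil => simp [PySem.Chars.lstrip, PySem.Chars.join_nil]
  | cons w rest =>
    obtain ⟨hw, hwc⟩ := h w (List.mem_cons_self ..)
    obtain ⟨c, w', rfl⟩ := List.exists_cons_of_ne_nil hw
    have hc : PySem.Chars.isspace c = false := hwc c (List.mem_cons_self ..)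
    cases rest with
    | nil =>
      rw [PySem.Chars.join_singleton]
      simp [PySem.Chars.lstrip, hc]
    | cons v t =>
      rw [PySem.Chars.join_cons_cons]
      simp [PySem.Chars.lstrip, hc]

theorem pvRstrip_append (l r : List Char) (hr : r ≠ [])
    (h : PySem.Chars.rstrip r = r) :
    PySem.Chars.rstrip (l ++ r) = l ++ r := by
  have hrev : r.reverse ≠ [] := by simpa using hr
  obtain ⟨c, cs, hcs⟩ := List.exists_cons_of_ne_nil hrev
  have hdw : List.dropWhile PySem.Chars.isspace r.reverse = r.reverse := by
    have := congrArg List.reverse h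
    simpa [PySem.Chars.rstrip] using this
  have hc : PySem.Chars.isspace c = false := by
    rw [hcs, List.dropWhile_cons] at hdw
    by_cases hsc : PySem.Chars.isspace c = true
    · exfalso
      rw [if_pos hsc] at hdw
      have hlen := congrArg List.length hdw
      have := List.length_dropWhile_le (p := PySem.Chars.isspace) (l := cs)
      simp at hlen; omega
    · exact Bool.not_eq_true _ ▸ hsc
  unfold PySem.Chars.rstrip
  rw [List.reverse_append, hcs, List.cons_append, List.dropWhile_cons, if_neg (by simp [hc])]
  rw [← List.cons_append, ← hcs, List.reverse_append, List.reverse_reverse, List.reverse_reverse]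

theorem pvRstrip_join (ws : List (List Char))
    (h : ∀ u ∈ ws, u ≠ [] ∧ ∀ c ∈ u, PySem.Chars.isspace c = false) :
    PySem.Chars.rstrip (PySem.Chars.join [' '] ws) = PySem.Chars.join [' '] ws := by
  induction ws with
  | nil => simp [PySem.Chars.rstrip, PySem.Chars.join_nil]
  | cons w rest ih =>
    obtain ⟨hw, hwc⟩ := h w (List.mem_cons_self ..)
    cases rest with
    | nil =>
      rw [PySem.Chars.join_singleton]
      have hrev : w.reverse ≠ [] := by simpa using hw
      obtain ⟨c, cs, hcs⟩ := List.exists_cons_of_ne_nil hrev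
      have hc : PySem.Chars.isspace c = false := by
        refine hwc c (List.mem_reverse.mp ?_)
        rw [hcs]; exact List.mem_cons_self ..
      unfold PySem.Chars.rstrip
      rw [hcs, List.dropWhile_cons, if_neg (by simp [hc]), ← hcs, List.reverse_reverse]
    | cons v t =>
      have hrest : ∀ u ∈ v :: t, u ≠ [] ∧ ∀ c ∈ u, PySem.Chars.isspace c = false :=
        fun u hu => h u (List.mem_cons_of_mem _ hu)
      have hvne : PySem.Chars.join [' '] (v :: t) ≠ [] := by
        obtain ⟨hv, _⟩ := hrest v (List.mem_cons_self ..)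
        cases t with
        | nil => rw [PySem.Chars.join_singleton]; exact hv
        | cons b t' =>
          rw [PySem.Chars.join_cons_cons]
          simp [hv]
      rw [PySem.Chars.join_cons_cons]
      rw [List.append_assoc]
      rw [pvRstrip_append _ _ (fun hx => hvne (by simpa using hx)) ?_]
      · have := pvRstrip_append [' '] _ hvne (ih hrest)
        simpa using this

theorem pvStrip_join (ws : List (List Char))
    (h : ∀ u ∈ ws, u ≠ [] ∧ ∀ c ∈ u, PySem.Chars.isspace c = false) :
    PySem.Chars.strip (PySem.Chars.join [' '] ws) = PySem.Chars.join [' '] ws := by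
  unfold PySem.Chars.strip
  rw [pvLstrip_join ws h, pvRstrip_join ws h]

theorem pvFoldl_filter (p : String → Bool) (l : List String) (acc : List String) :
    l.foldl (fun acc n => if p n then acc ++ [n] else acc) acc = acc ++ l.filter p := by
  induction l generalizing acc with
  | nil => simp
  | cons x l ih =>
    simp only [List.foldl_cons, List.filter_cons]
    by_cases h : p x = true
    · rw [if_pos h, if_pos h, ih, List.append_assoc]; rfl
    · rw [if_neg h, if_neg h, ih]

-- ===== VERDICT (by name: the statement is the Claim_ definition above) =====
theorem handleWords_spec : Claim_equal_handleWords := by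
  intro name brands _
  unfold Spec_handleWords
  simp only [handleWords, handleWords_alt]
  rw [pvFoldl_filter (fun n => !pvBrandLoop n brands), List.nil_append]
  by_cases hE : "" ∈ brands
  · have hcontains : (PySem.Set.ofList brands).contains "" = true :=
      (PySem.Set.contains_iff _ _).mpr ((PySem.Set.mem_ofList _ _).mpr hE)
    rw [if_pos hcontains]
    have hall : ∀ w, (!pvBrandLoop w brands) = false := by
      intro w
      have : pvBrandLoop w brands = true :=
        (pvBrandLoop_eq_true_iff w brands).mpr ⟨"", hE, pvIsIn_empty w⟩
      simp [this]
    rw [List.filter_congr (fun w _ => hall w), List.filter_false]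
    decide
  · have hcontains : (PySem.Set.ofList brands).contains "" = false := by
      rw [Bool.eq_false_iff]
      intro hx
      exact hE ((PySem.Set.mem_ofList _ _).mp ((PySem.Set.contains_iff _ _).mp hx))
    simp only [hcontains, Bool.false_eq_true, if_false]
    have hfilter :
        (PySem.Str.split₀ name).filter (fun n => !pvBrandLoop n brands)
          = (PySem.Str.split₀ name).filter (fun w => !pvHasBrandSub w (PySem.Set.ofList brands)
              (PySem.Set.ofList ((PySem.Set.ofList brands).map (fun b => b.toList.length)))) :=
      List.filter_congr (fun w _ => by rw [pvWord_agree brands hE w])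
    rw [hfilter]
    -- the final .strip() is the identity: joined words are nonempty and whitespace-free
    set L := (PySem.Str.split₀ name).filter
      (fun w => !pvHasBrandSub w (PySem.Set.ofList brands)
        (PySem.Set.ofList ((PySem.Set.ofList brands).map (fun b => b.toList.length)))) with hL
    have hwords : ∀ u ∈ L.map String.toList,
        u ≠ [] ∧ ∀ c ∈ u, PySem.Chars.isspace c = false := by
      intro u hu
      obtain ⟨w, hw, rfl⟩ := List.mem_map.mp hu
      have hwsplit : w ∈ PySem.Str.split₀ name := (List.mem_filter.mp (hL ▸ hw)).1
      obtain ⟨u', hu', rfl⟩ := List.mem_map.mp hwsplit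
      have := pvSplit₀_words name.toList u' hu'
      simpa using this
    show PySem.Str.strip (PySem.Str.join " " L) = PySem.Str.join " " L
    unfold PySem.Str.strip PySem.Str.join
    rw [show (" " : String).toList = [' '] from rfl]
    rw [String.toList_ofList, pvStrip_join _ hwords]
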